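-- pv_equiv track=rewrite | github.com/pvaduva/auto_test | CGCSAuto/utils/table_parser.py | __table_columns
-- ===== SOURCE A (Python) =====
-- def __table_columns(first_table_row):
--     """Find column ranges in output line.
--     Return list of tuples (start,end) for each column
--     detected by plus (+) characters in delimiter line.
--     """
--     positions = []
--     start = 1  # there is '+' at 0
--     while start < len(first_table_row):
--         end = first_table_row.find('+', start)
--         if end == -1:
--             break
--         positions.append((start, end))
--         start = end + 1
--     return positions
-- ===== SOURCE B (Python) =====
-- def __table_columns(first_table_row):
--     """Find column ranges in output line.
--     Gather all '+' delimiter positions first (with 0 as the synthetic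
--     left boundary), then pair consecutive boundaries.
--     """
--     row = first_table_row
--     bounds = [0] + [i for i in range(1, len(row)) if row[i] == '+']
--     return [(a + 1, b) for a, b in zip(bounds, bounds[1:])]
-- ===== Notes on version B (the rewrite author's own statement) =====
-- stated objective: simpler
-- what changed: Replaces A's interleaved str.find while-loop that advances a cursor across the string with a gather-then-pair decomposition: collect all plus-sign boundary positions (with 0 as the synthetic left boundary) in one comprehension, then zip consecutive boundaries into (start, end) ranges.
import Mathlib
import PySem

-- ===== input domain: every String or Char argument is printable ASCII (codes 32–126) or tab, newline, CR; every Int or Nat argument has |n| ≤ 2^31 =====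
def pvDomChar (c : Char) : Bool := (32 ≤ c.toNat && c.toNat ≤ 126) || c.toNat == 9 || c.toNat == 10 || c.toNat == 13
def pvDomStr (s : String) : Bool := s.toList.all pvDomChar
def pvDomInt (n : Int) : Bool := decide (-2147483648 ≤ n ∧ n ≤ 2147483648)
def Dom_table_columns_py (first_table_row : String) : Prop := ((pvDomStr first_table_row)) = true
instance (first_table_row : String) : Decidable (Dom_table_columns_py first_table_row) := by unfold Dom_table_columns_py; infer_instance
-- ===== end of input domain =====

-- B gathers all '+' boundary positions first and pairs consecutive boundaries,
-- replacing A's interleaved find-and-advance while loop (objective: simpler; same cost).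

-- ===== PORT A =====
-- the while loop of A: state = (positions, start); start only ever grows, so it is a Nat here
def pvALoop (cs : List Char) (positions : List (Int × Int)) (start : Nat) : List (Int × Int) :=
  if _h : start < cs.length then
    let e := PySem.Chars.findFrom cs ['+'] (start : Int)   -- first_table_row.find('+', start)
    if he : e = -1 then positions
    else pvALoop cs (positions ++ [((start : Int), e)]) (e.toNat + 1)
  else positions
termination_by cs.length - start
decreasing_by
  have hs := PySem.Chars.findFrom_natCast_spec cs ['+'] start (by omega) he
  omega

def table_columns_py (first_table_row : String) : List (Int × Int) :=
  pvALoop first_table_row.toList [] 1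

-- ===== PORT B =====
def table_columns_py_alt (first_table_row : String) : List (Int × Int) :=
  let cs := first_table_row.toList
  let bounds : List Int :=
    0 :: ((PySem.List.pyRange 1 (PySem.Str.len first_table_row) 1).filter
            (fun i => PySem.List.pyGetD cs i ' ' == '+'))
  (bounds.zip (bounds.drop 1)).map (fun ab => (ab.1 + 1, ab.2))

-- ===== PRECONDITION & SPEC =====
def Spec_table_columns_py (first_table_row : String) (out : List (Int × Int)) : Prop := out = table_columns_py_alt first_table_row
instance (first_table_row : String) (out : List (Int × Int)) : Decidable (Spec_table_columns_py first_table_row out) := by unfold Spec_table_columns_py; infer_instance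

-- ===== CLAIM (what is proved, stated in full; the proofs are below) =====
def Claim_equal_table_columns_py : Prop := ∀ (first_table_row : String), Dom_table_columns_py first_table_row → Spec_table_columns_py first_table_row (table_columns_py first_table_row)

-- ===== LEMMAS AND PROOFS =====

-- the '+' boundary positions ≥ k, increasing, as Ints (proof-side canonical form)
def pvPlus (cs : List Char) (k : Nat) : List Int :=
  if h : k < cs.length then
    (if cs[k] = '+' then [(k : Int)] else []) ++ pvPlus cs (k + 1)
  else []
termination_by cs.length - k

-- pair consecutive boundaries, carrying the previous boundary
def pvPairs (prev : Int) : List Int → List (Int × Int)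
  | [] => []
  | q :: qs => (prev + 1, q) :: pvPairs q qs

lemma pvPlus_ge_len (cs : List Char) (k : Nat) (h : cs.length ≤ k) : pvPlus cs k = [] := by
  conv_lhs => rw [pvPlus.eq_def]
  rw [dif_neg (by omega)]

lemma pvPlus_lt (cs : List Char) (k : Nat) (h : k < cs.length) :
    pvPlus cs k = (if cs[k] = '+' then [(k : Int)] else []) ++ pvPlus cs (k + 1) := by
  conv_lhs => rw [pvPlus.eq_def]
  rw [dif_pos h]

lemma singleton_prefix_iff (l : List Char) (c : Char) : [c] <+: l ↔ l.head? = some c := by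
  cases l with
  | nil => simp
  | cons x xs =>
    constructor
    · rintro ⟨t, ht⟩; simp at ht; simp [ht.1]
    · intro h; simp at h; exact ⟨xs, by simp [h]⟩

lemma prefix_plus_iff (cs : List Char) (i : Nat) :
    ['+'] <+: cs.drop i ↔ cs[i]? = some '+' := by
  rw [singleton_prefix_iff, List.head?_drop]

lemma pvPlus_nil_of_no_plus (cs : List Char) (k : Nat)
    (h : ∀ i, k ≤ i → cs[i]? ≠ some '+') : pvPlus cs k = [] := by
  by_cases hk : k < cs.length
  · rw [pvPlus_lt cs k hk]
    have hne : cs[k] ≠ '+' := by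
      intro hc
      exact h k le_rfl (by rw [List.getElem?_eq_getElem hk, hc])
    rw [if_neg hne, List.nil_append]
    exact pvPlus_nil_of_no_plus cs (k + 1) (fun i hi => h i (by omega))
  · exact pvPlus_ge_len cs k (by omega)
termination_by cs.length - k

lemma pvPlus_cons_of_least (cs : List Char) (k m : Nat)
    (hkm : k ≤ m) (hm : m < cs.length) (hplus : cs[m] = '+')
    (hmin : ∀ i, k ≤ i → i < m → cs[i]? ≠ some '+') :
    pvPlus cs k = (m : Int) :: pvPlus cs (m + 1) := by
  by_cases heq : k = m
  · subst heq
    rw [pvPlus_lt cs k hm, if_pos hplus]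
    rfl
  · have hk : k < cs.length := by omega
    rw [pvPlus_lt cs k hk]
    have hne : cs[k] ≠ '+' := by
      intro hc
      exact hmin k le_rfl (by omega) (by rw [List.getElem?_eq_getElem hk, hc])
    rw [if_neg hne, List.nil_append]
    exact pvPlus_cons_of_least cs (k + 1) m (by omega) hm hplus
      (fun i hi hlt => hmin i (by omega) hlt)
termination_by m - k

-- master lemma for A's loop
lemma pvALoop_eq (cs : List Char) (k : Nat) (acc : List (Int × Int)) :
    pvALoop cs acc k = acc ++ pvPairs ((k : Int) - 1) (pvPlus cs k) := by
  by_cases hk : k < cs.length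
  · rw [pvALoop.eq_def]
    rw [dif_pos hk]
    by_cases he : PySem.Chars.findFrom cs ['+'] (k : Int) = -1
    · rw [dif_pos he]
      have hne := (PySem.Chars.findFrom_natCast_eq_neg_one_iff cs ['+'] k (by omega)).mp he
      have hnil : pvPlus cs k = [] := by
        apply pvPlus_nil_of_no_plus
        intro i hi hget
        apply hne
        obtain ⟨t, ht⟩ := (prefix_plus_iff cs i).mpr hget
        refine ⟨List.take (i - k) (List.drop k cs), t, ?_⟩
        rw [List.append_assoc, ht]
        have hdd : List.drop (i - k) (List.drop k cs) = List.drop i cs := by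
          rw [List.drop_drop]; congr 1; omega
        rw [← hdd, List.take_append_drop]
      simp [hnil, pvPairs]
    · rw [dif_neg he]
      obtain ⟨hle, hpre, hmin⟩ := PySem.Chars.findFrom_natCast_spec cs ['+'] k (by omega) he
      set e := PySem.Chars.findFrom cs ['+'] (k : Int) with hedef
      have hget : cs[e.toNat]? = some '+' := (prefix_plus_iff cs e.toNat).mp hpre
      have hlen : e.toNat < cs.length := by
        by_contra h
        rw [List.getElem?_eq_none (by omega)] at hget
        simp at hget
      have hplus : cs[e.toNat] = '+' := by
        rw [List.getElem?_eq_getElem hlen] at hget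
        exact Option.some.inj hget
      have hcons : pvPlus cs k = ((e.toNat : Nat) : Int) :: pvPlus cs (e.toNat + 1) :=
        pvPlus_cons_of_least cs k e.toNat (by omega) hlen hplus
          (fun i hi hlt hg => hmin i hi hlt ((prefix_plus_iff cs i).mpr hg))
      rw [pvALoop_eq cs (e.toNat + 1) (acc ++ [((k : Int), e)])]
      rw [hcons, pvPairs]
      have h1 : (k : Int) - 1 + 1 = (k : Int) := by omega
      have h2 : ((e.toNat + 1 : Nat) : Int) - 1 = ((e.toNat : Nat) : Int) := by push_cast; ring
      have h3 : ((e.toNat : Nat) : Int) = e := by omega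
      rw [h1, h2, h3]
      simp
  · rw [pvALoop.eq_def, dif_neg hk, pvPlus_ge_len cs k (by omega)]
    simp [pvPairs]
termination_by cs.length - k
decreasing_by omega

-- the filtered index range of B is pvPlus
lemma filter_eq_pvPlus (cs : List Char) (k : Nat) :
    (PySem.List.pyRange (k : Int) (cs.length : Int) 1).filter
        (fun i => PySem.List.pyGetD cs i ' ' == '+')
      = pvPlus cs k := by
  by_cases h : k < cs.length
  · rw [PySem.List.pyRange_one_cons (by omega)]
    rw [pvPlus_lt cs k h]
    have hcast : ((k : Int) + 1) = ((k + 1 : Nat) : Int) := by push_cast; ring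
    have hget : PySem.List.pyGetD cs (k : Int) ' ' = cs[k] := by
      rw [PySem.List.pyGetD_natCast]
      exact List.getD_eq_getElem cs ' ' h
    by_cases hp : cs[k] = '+'
    · rw [List.filter_cons_of_pos (by simp [hget, hp])]
      rw [hcast, filter_eq_pvPlus cs (k + 1), if_pos hp]
      simp
    · rw [List.filter_cons_of_neg (by simp [hget, hp])]
      rw [hcast, filter_eq_pvPlus cs (k + 1), if_neg hp]
      simp
  · rw [PySem.List.pyRange_one_eq_nil (by omega), pvPlus_ge_len cs k (by omega)]
    rfl
termination_by cs.length - k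

-- zipping a boundary list with its own tail and shifting is pvPairs
lemma zip_tail_eq_pvPairs (ps : List Int) (p : Int) :
    (((p :: ps).zip ps).map (fun ab => (ab.1 + 1, ab.2))) = pvPairs p ps := by
  induction ps generalizing p with
  | nil => rfl
  | cons q qs ih => simp [pvPairs, ih q]

-- ===== VERDICT (by name: the statement is the Claim_ definition above) =====
theorem table_columns_py_spec : Claim_equal_table_columns_py := by
  intro s _
  unfold Spec_table_columns_py table_columns_py table_columns_py_alt
  rw [pvALoop_eq s.toList 1 []]
  have hf := filter_eq_pvPlus s.toList 1
  simp only [Nat.cast_one] at hf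
  simp only [List.nil_append, PySem.Str.len_eq, Nat.cast_one, List.drop_one, List.tail_cons]
  rw [hf, zip_tail_eq_pvPairs]
  norm_num
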